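-- pv_equiv track=rewrite | github.com/ayoubzulfiqar/Leetcode-Medium | NumberofSame-EndSubstrings/number_of_same-end_substrings.py | count_same_end_substrings
-- ===== SOURCE A (Python) =====
-- import collections
--
-- def count_same_end_substrings(s: str) -> int:
--     total_same_end_substrings = 0
--     char_frequencies = collections.defaultdict(int)
--     for char in s:
--         total_same_end_substrings += 1
--         total_same_end_substrings += char_frequencies[char]
--         char_frequencies[char] += 1
--     return total_same_end_substrings
-- ===== SOURCE B (Python) =====
-- import collections
--
-- def count_same_end_substrings(s: str) -> int:
--     return sum(k * (k + 1) // 2 for k in collections.Counter(s).values())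
-- ===== Notes on version B (the rewrite author's own statement) =====
-- stated objective: faster
-- what changed: Replaces A's incremental running total maintained inside the counting loop with a build-then-aggregate structure: first build Counter(s) in one pass, then sum the closed form k*(k+1)//2 over the distinct counts in a second, much shorter pass.
import Mathlib
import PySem

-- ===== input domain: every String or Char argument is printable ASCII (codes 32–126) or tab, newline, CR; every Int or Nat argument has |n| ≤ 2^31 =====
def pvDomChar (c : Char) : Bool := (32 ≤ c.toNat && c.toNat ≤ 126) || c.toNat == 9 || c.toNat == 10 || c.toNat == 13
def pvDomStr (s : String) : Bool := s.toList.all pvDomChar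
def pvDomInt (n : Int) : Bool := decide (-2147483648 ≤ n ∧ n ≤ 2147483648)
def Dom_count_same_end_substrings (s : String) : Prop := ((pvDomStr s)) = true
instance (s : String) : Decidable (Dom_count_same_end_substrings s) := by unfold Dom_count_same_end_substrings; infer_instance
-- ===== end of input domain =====

-- B replaces A's incremental running-total-while-counting with build-then-aggregate:
-- first Counter(s), then a separate pass summing the closed form k*(k+1)//2 per count
-- (alternative decomposition, same O(n) cost).

-- ===== PORT A =====
-- A: one loop, maintaining (running total, frequency dict); each char adds 1 + its
-- previous frequency to the total and increments its frequency (defaultdict(int)).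
def count_same_end_substrings (s : String) : Int :=
  (s.toList.foldl
    (fun (st : Int × PySem.Dict Char Int) c =>
      (st.1 + 1 + st.2.getD c 0, st.2.modify c 0 (· + 1)))
    ((0 : Int), (PySem.Dict.empty : PySem.Dict Char Int))).1

-- ===== PORT B =====
-- B: Counter(s), then sum k*(k+1)//2 over its values.
def count_same_end_substrings_alt (s : String) : Int :=
  ((PySem.Dict.counter s.toList).values.map
    (fun k => PySem.Int.floordiv (k * (k + 1)) 2)).sum

-- ===== PRECONDITION & SPEC =====
def Spec_count_same_end_substrings (s : String) (out : Int) : Prop := out = count_same_end_substrings_alt s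
instance (s : String) (out : Int) : Decidable (Spec_count_same_end_substrings s out) := by unfold Spec_count_same_end_substrings; infer_instance

-- ===== CLAIM (what is proved, stated in full; the proofs are below) =====
def Claim_equal_count_same_end_substrings : Prop := ∀ (s : String), Dom_count_same_end_substrings s → Spec_count_same_end_substrings s (count_same_end_substrings s)

-- ===== LEMMAS AND PROOFS =====

def pvTri (k : Int) : Int := PySem.Int.floordiv (k * (k + 1)) 2

def pvS (d : PySem.Dict Char Int) : Int := (d.items.map (fun p => pvTri p.2)).sum

lemma pvTri_succ (k : Int) : pvTri (k + 1) = pvTri k + (k + 1) := by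
  unfold pvTri
  rw [PySem.Int.floordiv_eq_ediv_of_pos (by norm_num),
      PySem.Int.floordiv_eq_ediv_of_pos (by norm_num)]
  obtain ⟨m, hm⟩ := Int.even_mul_succ_self k
  have h2 : (k + 1) * (k + 1 + 1) = k * (k + 1) + 2 * (k + 1) := by ring
  rw [h2, hm]
  omega

lemma sum_tri_replace (c : Char) (k : Int) :
    ∀ (l : List (Char × Int)), (l.map Prod.fst).Nodup → (c, k) ∈ l →
    ((l.map (fun p => if p.1 == c then (c, k + 1) else p)).map (fun p => pvTri p.2)).sum
      = (l.map (fun p => pvTri p.2)).sum + (k + 1) := by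
  intro l
  induction l with
  | nil => intro _ h; cases h
  | cons p tl ih =>
    intro hnd hmem
    simp only [List.map_cons, List.nodup_cons] at hnd
    rcases List.mem_cons.mp hmem with hp | htl
    · subst hp
      simp only [List.map_cons, List.sum_cons, if_pos (by simp : ((c, k).1 == c) = true)]
      have htail : tl.map (fun p => if p.1 == c then (c, k + 1) else p) = tl := by
        calc tl.map (fun p => if p.1 == c then (c, k + 1) else p)
            = tl.map id := by
              apply List.map_congr_left
              intro q hq
              have hq1 : q.1 ≠ c := by
                intro h
                have hm : q.1 ∈ tl.map Prod.fst := List.mem_map_of_mem hq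
                exact hnd.1 (h ▸ hm)
              simp [hq1]
          _ = tl := List.map_id tl
      rw [htail, pvTri_succ]; ring
    · have hpc : p.1 ≠ c := by
        intro h
        have : c ∈ tl.map Prod.fst := by
          have := List.mem_map_of_mem (f := Prod.fst) htl; simpa using this
        exact hnd.1 (h ▸ this)
      simp only [List.map_cons, List.sum_cons, if_neg (by simp [hpc] : ¬ ((p.1 == c) = true))]
      have h := ih hnd.2 htl
      omega

lemma pvS_modify (d : PySem.Dict Char Int) (hnd : d.keys.Nodup) (c : Char) :
    pvS (d.modify c 0 (· + 1)) = pvS d + (d.getD c 0 + 1) := by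
  have hmod : d.modify c 0 (· + 1) = d.insert c (d.getD c 0 + 1) := rfl
  rw [hmod]
  by_cases hc : d.contains c = true
  · obtain ⟨v, hv⟩ : ∃ v, d.get? c = some v := by
      have := PySem.Dict.contains_eq_isSome_get? (d := d) (k := c)
      rw [hc] at this
      exact Option.isSome_iff_exists.mp this.symm
    have hk : d.getD c 0 = v := PySem.Dict.getD_of_get?_eq_some (d := d) 0 hv
    have hmemi : (c, v) ∈ d.items := PySem.Dict.mem_items_of_get?_eq_some (d := d) hv
    have hit := PySem.Dict.items_insert_of_contains (d := d) (v := d.getD c 0 + 1) hc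
    unfold pvS
    rw [hit, hk]
    exact sum_tri_replace c v d.items hnd hmemi
  · have hk : d.getD c 0 = 0 :=
      PySem.Dict.getD_of_not_contains (d := d) 0 (eq_false_of_ne_true hc)
    have hit := PySem.Dict.items_insert_of_not_contains (d := d) (v := d.getD c 0 + 1)
      (eq_false_of_ne_true hc)
    have hit' : (d.insert c (d.getD c 0 + 1)).items = d.items ++ [(c, (1 : Int))] := by
      rw [hit, hk]; norm_num
    have h1 : pvTri 1 = 1 := by decide
    unfold pvS
    rw [hit', hk, List.map_append, List.sum_append]
    simp [h1]

lemma loopA (cs : List Char) :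
    ∀ (t : Int) (d : PySem.Dict Char Int), d.keys.Nodup →
    (cs.foldl (fun (st : Int × PySem.Dict Char Int) c =>
        (st.1 + 1 + st.2.getD c 0, st.2.modify c 0 (· + 1))) (t, d)).1
      = t + pvS (cs.foldl (fun d c => d.modify c 0 (· + 1)) d) - pvS d := by
  induction cs with
  | nil => intro t d _; simp
  | cons c cs ih =>
    intro t d hnd
    have hnd' : (d.modify c 0 (· + 1)).keys.Nodup := by
      have hmod : d.modify c 0 (· + 1) = d.insert c (d.getD c 0 + 1) := rfl
      rw [hmod]; exact PySem.Dict.nodup_keys_insert _ _ _ hnd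
    simp only [List.foldl_cons]
    rw [ih (t + 1 + d.getD c 0) (d.modify c 0 (· + 1)) hnd', pvS_modify d hnd c]
    ring

-- ===== VERDICT (by name: the statement is the Claim_ definition above) =====
theorem count_same_end_substrings_spec : Claim_equal_count_same_end_substrings := by
  intro s _
  show count_same_end_substrings s = count_same_end_substrings_alt s
  have hB : count_same_end_substrings_alt s
      = pvS (PySem.Dict.counter s.toList) := by
    simp [count_same_end_substrings_alt, pvS, pvTri, PySem.Dict.values,
      List.map_map, Function.comp_def]
  unfold count_same_end_substrings
  rw [loopA s.toList 0 PySem.Dict.empty (by decide), hB, PySem.Dict.counter_eq_foldl]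
  have hSe : pvS PySem.Dict.empty = 0 := rfl
  rw [hSe]
  ring
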